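-- pv_equiv track=rewrite | github.com/songminj/Algo | 백준/Bronze/27962. 오렌지먹은지오랜지/오렌지먹은지오랜지.py | orange
-- ===== SOURCE A (Python) =====
-- def orange(word, N):
--     for i in range(1, N):
--         a, b = word[:i], word[N-i:]
--         flag = 0
--         for j in range(i):
--             if a[j] != b[j]:
--                 flag +=1
--         if flag == 1:
--             return "YES"
--     else:
--         return "NO"
-- ===== SOURCE B (Python) =====
-- def orange(word, N):
--     # Histogram algorithm: one pass over all index pairs (p, q), p < q < N,
--     # tallying mismatches by their distance s = q - p.  The prefix of length i
--     # and the suffix of length i differ in exactly one position iff the shift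
--     # s = N - i has exactly one mismatching pair, so the answer is read off
--     # the histogram at the end; no per-i prefix/suffix comparison is made.
--     hist = [0] * N
--     for q in range(1, N):
--         c = word[q]
--         for p in range(q):
--             if word[p] != c:
--                 hist[q - p] += 1
--     return "YES" if 1 in hist[1:] else "NO"
-- ===== Notes on version B (the rewrite author's own statement) =====
-- stated objective: alternative
-- what changed: B abandons A's per-length prefix/suffix comparison: it makes one pass over all index pairs (p,q), p<q<N, building a mismatch histogram keyed by the pair distance s=q-p, and answers YES iff some entry hist[s], 1<=s<N, equals 1 (the prefix/suffix of length i=N-s differ in exactly one place iff shift s has exactly one mismatching pair); Pre_ excludes exactly the inputs (N >= 2 and N > len(word)) on which A raises IndexError.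
import Mathlib
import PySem

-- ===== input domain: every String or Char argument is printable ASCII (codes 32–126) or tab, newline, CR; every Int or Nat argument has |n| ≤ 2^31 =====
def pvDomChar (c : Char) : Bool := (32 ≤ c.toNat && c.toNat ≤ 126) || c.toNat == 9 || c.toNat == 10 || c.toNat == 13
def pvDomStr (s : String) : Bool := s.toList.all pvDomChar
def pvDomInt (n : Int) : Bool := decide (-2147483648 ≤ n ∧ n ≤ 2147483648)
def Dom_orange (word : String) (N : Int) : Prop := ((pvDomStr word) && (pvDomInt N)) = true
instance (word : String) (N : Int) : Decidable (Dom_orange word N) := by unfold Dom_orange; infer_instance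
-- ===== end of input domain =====

-- B replaces A's per-length prefix/suffix comparison by a single pass over all index
-- pairs that builds a mismatch histogram keyed by pair distance, read off at the end
-- (alternative algorithm, same asymptotic cost); equivalence proved on Pre_ (where A returns).

-- ===== PORT A =====
-- inner loop of A: for j in range(i): if a[j] != b[j]: flag += 1
def orangeInner (a b : List Char) (i : Int) : Int :=
  (PySem.List.pyRange 0 i 1).foldl
    (fun flag j => if PySem.List.pyGet? a j ≠ PySem.List.pyGet? b j then flag + 1 else flag) 0

def orangeLoop (wl : List Char) (N : Int) : List Int → String
  | [] => "NO"
  | i :: rest =>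
    let a := PySem.List.slice wl none (some i)
    let b := PySem.List.slice wl (some (N - i)) none
    if orangeInner a b i = 1 then "YES" else orangeLoop wl N rest

def orange (word : String) (N : Int) : String :=
  orangeLoop word.toList N (PySem.List.pyRange 1 N 1)

-- ===== PORT B =====
-- inner loop of B: c = word[q]; for p in range(q): if word[p] != c: hist[q-p] += 1
def orangeAltInner (wl : List Char) (q : Int) (hist : List Int) : List Int :=
  let c := PySem.List.pyGet? wl q
  (PySem.List.pyRange 0 q 1).foldl
    (fun hist p =>
      if PySem.List.pyGet? wl p ≠ c
      then PySem.List.pySetD hist (q - p) (PySem.List.pyGetD hist (q - p) 0 + 1)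
      else hist) hist

-- hist = [0]*N; for q in range(1, N): <inner>
def orangeAltHist (wl : List Char) (N : Int) : List Int :=
  (PySem.List.pyRange 1 N 1).foldl (fun hist q => orangeAltInner wl q hist)
    (List.replicate N.toNat 0)

-- return "YES" if 1 in hist[1:] else "NO"
def orange_alt (word : String) (N : Int) : String :=
  if (1 : Int) ∈ PySem.List.slice (orangeAltHist word.toList N) (some 1) none
  then "YES" else "NO"

-- ===== PRECONDITION & SPEC =====
-- Pre_ excludes exactly the inputs where A raises IndexError (N ≥ 2 and N > len(word)).
def Pre_orange (word : String) (N : Int) : Prop :=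
  N ≤ 1 ∨ N ≤ (word.toList.length : Int)
instance (word : String) (N : Int) : Decidable (Pre_orange word N) := by
  unfold Pre_orange; infer_instance
def pvWitness_orange : String × Int := ("aba", 3)
def Spec_orange (word : String) (N : Int) (out : String) : Prop := out = orange_alt word N
instance (word : String) (N : Int) (out : String) : Decidable (Spec_orange word N out) := by
  unfold Spec_orange; infer_instance

-- ===== CLAIM (what is proved, stated in full; the proofs are below) =====
def Claim_equal_orange : Prop := ∀ (word : String) (N : Int),
  Dom_orange word N → Pre_orange word N → Spec_orange word N (orange word N)

-- ===== LEMMAS AND PROOFS =====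

-- mismatch test at shift s, position p: word[p] != word[p+s]
def mism (wl : List Char) (s p : Nat) : Bool := decide (wl[p]? ≠ wl[p + s]?)

-- number of mismatching pairs at distance s among positions < Q
def cnt (wl : List Char) (Q s : Nat) : Nat :=
  if s = 0 then 0 else (List.range (Q - s)).countP (mism wl s)

lemma set_map_range {n k : Nat} (f : Nat → Int) (v : Int) :
    ((List.range n).map f).set k v = (List.range n).map (fun s => if s = k then v else f s) := by
  apply List.ext_getElem
  · simp
  · intro j h1 h2
    simp only [List.length_set, List.length_map, List.length_range] at h1
    simp only [List.getElem_set, List.getElem_map, List.getElem_range]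
    by_cases h : j = k
    · simp [h]
    · rw [if_neg (fun e => h e.symm), if_neg h]

lemma getD_map_range' {n k : Nat} (f : Nat → Int) (hk : k < n) :
    PySem.List.pyGetD ((List.range n).map f) (k : Int) 0 = f k := by
  simp [PySem.List.pyGetD_natCast, List.getD, hk]

-- inner loop invariant: after p ranges over [0, m), index s got +1 iff q-m < s ≤ q and
-- positions (q-s, q) mismatch
lemma inner_partial (wl : List Char) (n q : Nat) (hq : q < n) :
    ∀ (m : Nat) (_ : m ≤ q) (g : Nat → Int),
    (PySem.List.pyRange 0 (m : Int) 1).foldl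
      (fun hist p =>
        if PySem.List.pyGet? wl p ≠ PySem.List.pyGet? wl (q : Int)
        then PySem.List.pySetD hist ((q : Int) - p) (PySem.List.pyGetD hist ((q : Int) - p) 0 + 1)
        else hist) ((List.range n).map g)
    = (List.range n).map
        (fun s => if q - m < s ∧ s ≤ q ∧ mism wl s (q - s) = true then g s + 1 else g s) := by
  intro m
  induction m with
  | zero =>
    intro _ g
    rw [show ((0:Nat):Int) = (0:Int) by norm_num, PySem.List.pyRange_one_eq_nil (by omega)]
    simp only [List.foldl_nil]
    congr 1
    funext s
    have : ¬ (q - 0 < s ∧ s ≤ q ∧ mism wl s (q - s) = true) := by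
      rintro ⟨h1, h2, _⟩; omega
    exact (if_neg this).symm
  | succ m ih =>
    intro hm g
    have hm' : m ≤ q := by omega
    have hcast : ((m + 1 : Nat) : Int) = (m : Int) + 1 := by push_cast; ring
    rw [hcast, PySem.List.pyRange_one_succ_right (by positivity), List.foldl_append,
      ih hm' g]
    simp only [List.foldl_cons, List.foldl_nil]
    have hget : PySem.List.pyGet? wl (m : Int) = wl[m]? := PySem.List.pyGet?_natCast wl m
    have hgetq : PySem.List.pyGet? wl (q : Int) = wl[q]? := PySem.List.pyGet?_natCast wl q
    have hmismeq : mism wl (q - m) (q - (q - m)) = decide (wl[m]? ≠ wl[q]?) := by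
      have e1 : q - (q - m) = m := by omega
      have e2 : m + (q - m) = q := by omega
      unfold mism
      rw [e1, e2]
    set g' : Nat → Int :=
      fun s => if q - m < s ∧ s ≤ q ∧ mism wl s (q - s) = true then g s + 1 else g s with hg'
    by_cases hc : wl[m]? ≠ wl[q]?
    · rw [if_pos (by rw [hget, hgetq]; exact hc)]
      have hsub : (q : Int) - (m : Int) = ((q - m : Nat) : Int) := by push_cast; omega
      have hlt : q - m < n := by omega
      rw [hsub, getD_map_range' g' hlt, PySem.List.pySetD_natCast, set_map_range g' _]
      congr 1
      funext s
      by_cases hs : s = q - m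
      · subst hs
        have h1 : ¬ (q - m < q - m ∧ q - m ≤ q ∧ mism wl (q - m) (q - (q - m)) = true) := by
          rintro ⟨h, _, _⟩; omega
        have h2 : q - (m + 1) < q - m ∧ q - m ≤ q ∧ mism wl (q - m) (q - (q - m)) = true := by
          refine ⟨by omega, by omega, ?_⟩
          rw [hmismeq]; simpa using hc
        rw [if_pos rfl]
        simp only [hg']
        rw [if_neg h1, if_pos h2]
      · have hiff : (q - m < s ∧ s ≤ q ∧ mism wl s (q - s) = true)
            ↔ (q - (m + 1) < s ∧ s ≤ q ∧ mism wl s (q - s) = true) := by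
          constructor
          · rintro ⟨h1, h2, h3⟩; exact ⟨by omega, h2, h3⟩
          · rintro ⟨h1, h2, h3⟩; exact ⟨by omega, h2, h3⟩
        rw [if_neg hs]
        simp only [hg']
        by_cases hcond : q - m < s ∧ s ≤ q ∧ mism wl s (q - s) = true
        · rw [if_pos hcond, if_pos (hiff.mp hcond)]
        · rw [if_neg hcond, if_neg (fun h => hcond (hiff.mpr h))]
    · rw [if_neg (by rw [hget, hgetq]; exact hc)]
      congr 1
      funext s
      by_cases hs : s = q - m
      · subst hs
        have h1 : ¬ (q - m < q - m ∧ q - m ≤ q ∧ mism wl (q - m) (q - (q - m)) = true) := by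
          rintro ⟨h, _, _⟩; omega
        have h2 : ¬ (q - (m + 1) < q - m ∧ q - m ≤ q ∧ mism wl (q - m) (q - (q - m)) = true) := by
          rintro ⟨_, _, h3⟩
          rw [hmismeq] at h3
          simp at h3
          exact hc (by simp [h3])
        rw [if_neg h2]
        simp only [hg']
        rw [if_neg h1]
      · simp only [hg']
        by_cases hcond : q - m < s ∧ s ≤ q ∧ mism wl s (q - s) = true
        · rw [if_pos hcond, if_pos ⟨by omega, hcond.2.1, hcond.2.2⟩]
        · rw [if_neg hcond, if_neg]
          rintro ⟨h1, h2, h3⟩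
          exact hcond ⟨by omega, h2, h3⟩

-- outer loop invariant: after q ranges over [1, Q), hist[s] = cnt wl Q s
lemma hist_partial (wl : List Char) (n : Nat) :
    ∀ (Q : Nat) (_ : Q ≤ n),
    (PySem.List.pyRange 1 (Q : Int) 1).foldl (fun hist q => orangeAltInner wl q hist)
      ((List.range n).map (fun _ => (0 : Int)))
    = (List.range n).map (fun s => (cnt wl Q s : Int)) := by
  intro Q
  induction Q with
  | zero =>
    intro _
    rw [show ((0:Nat):Int) = (0:Int) by norm_num, PySem.List.pyRange_one_eq_nil (by omega)]
    simp only [List.foldl_nil]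
    congr 1
    funext s
    unfold cnt
    split <;> simp
  | succ Q ih =>
    intro hQ
    rcases Nat.eq_zero_or_pos Q with h0 | hpos
    · subst h0
      rw [show ((1:Nat):Int) = (1:Int) by norm_num, PySem.List.pyRange_one_eq_nil (by omega)]
      simp only [List.foldl_nil]
      congr 1
      funext s
      unfold cnt
      split
      · simp
      · have : 1 - s = 0 := by omega
        simp [this]
    · have hcast : ((Q + 1 : Nat) : Int) = (Q : Int) + 1 := by push_cast; ring
      rw [hcast, PySem.List.pyRange_one_succ_right (by exact_mod_cast hpos),
        List.foldl_append, ih (by omega)]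
      simp only [List.foldl_cons, List.foldl_nil]
      unfold orangeAltInner
      rw [inner_partial wl n Q (by omega) Q (le_refl Q) (fun s => (cnt wl Q s : Int))]
      congr 1
      funext s
      by_cases hs0 : s = 0
      · subst hs0
        have : ¬ (Q - Q < 0 ∧ 0 ≤ Q ∧ mism wl 0 (Q - 0) = true) := by
          rintro ⟨h, _, _⟩; omega
        simp only [if_neg this]
        unfold cnt
        simp
      · by_cases hsQ : s ≤ Q
        · have hrange : Q + 1 - s = (Q - s) + 1 := by omega
          have hcnt1 : cnt wl (Q + 1) s = cnt wl Q s + (if mism wl s (Q - s) = true then 1 else 0) := by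
            unfold cnt
            rw [if_neg hs0, if_neg hs0, hrange, List.range_succ, List.countP_append]
            congr 1
            by_cases hm2 : mism wl s (Q - s) = true <;> simp [hm2]
          rw [hcnt1]
          by_cases hm : mism wl s (Q - s) = true
          · rw [if_pos ⟨by omega, hsQ, hm⟩, if_pos hm]
            omega
          · rw [if_neg (by rintro ⟨_, _, h⟩; exact hm h), if_neg hm]
            simp
        · have : ¬ (Q - Q < s ∧ s ≤ Q ∧ mism wl s (Q - s) = true) := by
            rintro ⟨_, h, _⟩; omega
          rw [if_neg this]
          unfold cnt
          rw [if_neg hs0, if_neg hs0]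
          have h1 : Q + 1 - s ≤ Q - s + 1 := by omega
          have h2 : Q - s = 0 := by omega
          have h3 : Q + 1 - s = 0 ∨ Q + 1 - s = 1 := by omega
          rcases h3 with h3 | h3 <;> rcases (by omega : Q + 1 - s = Q - s ∨ False) with h4 | h4
          · rw [h4]
          · exact absurd h4 (by simp)
          · rw [h4]
          · exact absurd h4 (by simp)

-- A's inner loop at length i equals the pair-mismatch count at shift n - i
lemma innerA_eq_cnt (wl : List Char) (N i : Int)
    (h1 : 1 ≤ i) (h2 : i < N) (_hN : N ≤ (wl.length : Int)) :
    orangeInner (PySem.List.slice wl none (some i)) (PySem.List.slice wl (some (N - i)) none) i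
    = (cnt wl N.toNat (N.toNat - i.toNat) : Int) := by
  set n := N.toNat with hn
  set m := i.toNat with hmdef
  set s := n - m with hsdef
  have hi : (i : Int) = (m : Int) := by omega
  have hNi : N - i = ((n - m : Nat) : Int) := by omega
  have ha : PySem.List.slice wl none (some i) = wl.take m := by
    rw [PySem.List.slice_to _ (by omega)]
  have hb : PySem.List.slice wl (some (N - i)) none = wl.drop s := by
    rw [hNi, PySem.List.slice_from_natCast]
  rw [ha, hb]
  unfold orangeInner
  rw [hi, PySem.List.pyRange_zero_natCast, List.foldl_map]
  have hfun : (fun (flag : Int) (k : Nat) =>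
      if PySem.List.pyGet? (wl.take m) (k : Int) ≠ PySem.List.pyGet? (wl.drop s) (k : Int)
      then flag + 1 else flag)
      = (fun (flag : Int) (k : Nat) =>
      if (fun k => decide ((wl.take m)[k]? ≠ (wl.drop s)[k]?)) k = true then flag + 1 else flag) := by
    funext flag k
    rw [PySem.List.pyGet?_natCast, PySem.List.pyGet?_natCast]
    simp
  rw [hfun, PySem.List.foldl_count_if, zero_add]
  congr 1
  unfold cnt
  rw [if_neg (by omega)]
  have hns : n - s = m := by omega
  rw [hns]
  apply List.countP_congr
  intro k hk
  rw [List.mem_range] at hk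
  unfold mism
  have hkm : (wl.take m)[k]? = wl[k]? := by
    rw [List.getElem?_take, if_pos hk]
  have hkd : (wl.drop s)[k]? = wl[k + s]? := by
    rw [List.getElem?_drop]
    congr 1
    omega
  rw [hkm, hkd]

-- A's search loop returns YES iff some i in the list has inner count 1
lemma loopA (wl : List Char) (N : Int) (l : List Int) :
    orangeLoop wl N l = if (∃ i ∈ l, orangeInner (PySem.List.slice wl none (some i))
        (PySem.List.slice wl (some (N - i)) none) i = 1) then "YES" else "NO" := by
  induction l with
  | nil => simp [orangeLoop]
  | cons i rest ih =>
    simp only [orangeLoop]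
    by_cases hc : orangeInner (PySem.List.slice wl none (some i))
        (PySem.List.slice wl (some (N - i)) none) i = 1
    · rw [if_pos hc, if_pos ⟨i, List.mem_cons_self, hc⟩]
    · rw [if_neg hc, ih]
      congr 1
      simp only [List.mem_cons, eq_iff_iff]
      constructor
      · rintro ⟨j, hj, hcj⟩; exact ⟨j, Or.inr hj, hcj⟩
      · rintro ⟨j, hj | hj, hcj⟩
        · exact absurd (hj ▸ hcj) hc
        · exact ⟨j, hj, hcj⟩

lemma mem_drop_one_range {n s : Nat} : s ∈ (List.range n).drop 1 ↔ 1 ≤ s ∧ s < n := by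
  cases n with
  | zero => simp
  | succ m =>
    rw [List.range_succ_eq_map]
    simp only [List.drop_succ_cons, List.drop_zero, List.mem_map, List.mem_range]
    constructor
    · rintro ⟨k, hk, rfl⟩; omega
    · rintro ⟨h1, h2⟩; exact ⟨s - 1, by omega, by omega⟩

-- ===== VERDICT (by name: the statement is the Claim_ definition above) =====
theorem orange_spec : Claim_equal_orange := by
  intro word N _ hpre
  unfold Spec_orange orange orange_alt orangeAltHist
  set wl := word.toList with hwl
  by_cases hN1 : N ≤ 1
  · rw [PySem.List.pyRange_one_eq_nil hN1]
    simp only [List.foldl_nil, orangeLoop]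
    have hnm : ¬ ((1 : Int) ∈ PySem.List.slice (List.replicate N.toNat (0 : Int)) (some 1) none) := by
      rw [PySem.List.slice_from _ (by norm_num)]
      intro hmem
      have h2 := List.eq_of_mem_replicate (List.mem_of_mem_drop hmem)
      omega
    rw [if_neg hnm]
  · have hL : N ≤ (wl.length : Int) := by
      rcases hpre with h | h
      · omega
      · exact h
    have h0N : 0 ≤ N := by omega
    set n := N.toNat with hn
    have hNn : ((n : Nat) : Int) = N := by omega
    have hrepl : List.replicate n (0 : Int) = (List.range n).map (fun _ => (0 : Int)) := by
      rw [List.map_const', List.length_range]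
    rw [hrepl, ← hNn, hist_partial wl n n (le_refl n), loopA]
    have hmem : ((1 : Int) ∈ PySem.List.slice ((List.range n).map (fun s => (cnt wl n s : Int)))
        (some 1) none) ↔ (∃ s, 1 ≤ s ∧ s < n ∧ cnt wl n s = 1) := by
      rw [PySem.List.slice_from _ (by norm_num)]
      simp only [Int.toNat_one, ← List.map_drop, List.mem_map]
      constructor
      · rintro ⟨s, hs, he⟩
        rw [mem_drop_one_range] at hs
        exact ⟨s, hs.1, hs.2, by omega⟩
      · rintro ⟨s, h1, h2, h3⟩
        exact ⟨s, mem_drop_one_range.mpr ⟨h1, h2⟩, by omega⟩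
    have hiff : (∃ i ∈ PySem.List.pyRange 1 ((n : Nat) : Int) 1,
        orangeInner (PySem.List.slice wl none (some i))
          (PySem.List.slice wl (some (((n : Nat) : Int) - i)) none) i = 1)
        ↔ (∃ s, 1 ≤ s ∧ s < n ∧ cnt wl n s = 1) := by
      constructor
      · rintro ⟨i, hi, hci⟩
        rw [PySem.List.mem_pyRange_one] at hi
        rw [innerA_eq_cnt wl _ i hi.1 hi.2 (by rw [hNn]; exact hL)] at hci
        refine ⟨n - i.toNat, by omega, by omega, ?_⟩
        have : (Int.toNat ((n : Nat) : Int)) = n := by omega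
        rw [this] at hci
        exact_mod_cast hci
      · rintro ⟨s, h1, h2, h3⟩
        refine ⟨((n - s : Nat) : Int), PySem.List.mem_pyRange_one.mpr ⟨by omega, by omega⟩, ?_⟩
        rw [innerA_eq_cnt wl _ _ (by omega) (by omega) (by rw [hNn]; exact hL)]
        have he : Int.toNat ((n : Nat) : Int) - Int.toNat ((n - s : Nat) : Int) = s := by omega
        rw [he]
        exact_mod_cast h3
    by_cases hyes : ∃ s, 1 ≤ s ∧ s < n ∧ cnt wl n s = 1
    · rw [if_pos (hiff.mpr hyes), if_pos (hmem.mpr hyes)]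
    · rw [if_neg (fun h => hyes (hiff.mp h)), if_neg (fun h => hyes (hmem.mp h))]
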